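-- pv_equiv track=rewrite | github.com/MeilingLiu1997/crypto | block_ciphers/cipher.py | block_transposition_encrypt
-- ===== SOURCE A (Python) =====
-- def block_transposition_encrypt(plaintext, key):
-- 	""" Transposition cipher -- block-transposition cipher
-- 		In transposition ciphers the letters or words of the text are not changed,
-- 		but their order is altered according to some prearranged plan.
-- 		From "Manual of Cryptography", 1911, page 20
--
-- 		Reference source code from: https://inventwithpython.com/hacking/chapter8.html
-- 	"""
-- 	# Each string in ciphertext represents a column in the grid.
-- 	ciphertext = [''] * key
--
-- 	# Loop through each column in ciphertext.
-- 	for col in range(key):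
-- 		pointer = col
-- 		# Keep looping until pointer goes past the length of the plaintext.
-- 		while pointer < len(plaintext):
-- 			# Place the character at pointer in plaintext at the end of the current column in the ciphertext list.
-- 			ciphertext[col] += plaintext[pointer]
-- 			# move pointer over
-- 			pointer += key
-- 	# Convert the ciphertext list into a single string value and return it.
-- 	return ''.join(ciphertext)
-- ===== SOURCE B (Python) =====
-- def block_transposition_encrypt(plaintext, key):
-- 	# Single forward pass: scatter each character into its column bucket by index mod key.
-- 	if key <= 0:
-- 		return ''
-- 	cols = [''] * key
-- 	for i, ch in enumerate(plaintext):
-- 		cols[i % key] += ch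
-- 	return ''.join(cols)
-- ===== Notes on version B (the rewrite author's own statement) =====
-- stated objective: simpler
-- what changed: Replaces the per-column strided rescan (outer loop over columns, inner pointer loop stepping by key) with one linear enumerate pass that appends each character to its bucket cols[i % key]; a key <= 0 guard returns '' as A does.
import Mathlib
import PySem

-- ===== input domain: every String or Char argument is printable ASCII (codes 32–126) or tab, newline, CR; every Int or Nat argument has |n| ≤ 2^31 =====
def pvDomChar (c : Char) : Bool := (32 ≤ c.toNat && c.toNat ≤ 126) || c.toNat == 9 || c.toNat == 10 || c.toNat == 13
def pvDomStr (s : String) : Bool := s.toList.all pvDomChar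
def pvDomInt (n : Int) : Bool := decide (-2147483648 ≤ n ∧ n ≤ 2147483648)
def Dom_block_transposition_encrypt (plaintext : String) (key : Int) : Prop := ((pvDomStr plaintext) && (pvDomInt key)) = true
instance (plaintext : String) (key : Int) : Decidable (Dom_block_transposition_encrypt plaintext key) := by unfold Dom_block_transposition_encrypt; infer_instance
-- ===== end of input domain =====

-- B replaces A's per-column strided rescan by a single forward pass scattering each
-- character into bucket i % key (objective: simpler); same return value on all inputs.

-- ===== PORT A =====
-- the inner `while pointer < len(plaintext)` loop of A, building column `pointer % key`;
-- the `0 < key` conjunct is a totality guard only (A reaches the loop only with key ≥ 1,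
-- since `col` ranges over range(key))
def pvColA (cs : List Char) (key : Nat) (pointer : Nat) : List Char :=
  if h : pointer < cs.length ∧ 0 < key then
    cs[pointer] :: pvColA cs key (pointer + key)
  else []
termination_by cs.length - pointer
decreasing_by omega

def block_transposition_encrypt (plaintext : String) (key : Int) : String :=
  let cs := plaintext.toList
  -- ciphertext = [''] * key, then for col in range(key) the while loop fills column col
  let ciphertext := (PySem.List.pyRange 0 key 1).map (fun col => pvColA cs key.toNat col.toNat)
  -- ''.join(ciphertext)
  String.ofList ciphertext.flatten

-- ===== PORT B =====
def block_transposition_encrypt_alt (plaintext : String) (key : Int) : String :=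
  if key ≤ 0 then "" else
    -- cols = [''] * key; for i, ch in enumerate(plaintext): cols[i % key] += ch
    -- (i ≥ 0 and key > 0, so Python's i % key is Nat-mod; .toNat is exact here)
    let cols := (PySem.List.enumerate plaintext.toList 0).foldl
      (fun cols p => cols.modify (PySem.Int.mod p.1 key).toNat (fun col => col ++ [p.2]))
      (List.replicate key.toNat ([] : List Char))
    -- ''.join(cols)
    String.ofList cols.flatten

-- ===== PRECONDITION & SPEC =====
def Spec_block_transposition_encrypt (plaintext : String) (key : Int) (out : String) : Prop := out = block_transposition_encrypt_alt plaintext key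
instance (plaintext : String) (key : Int) (out : String) : Decidable (Spec_block_transposition_encrypt plaintext key out) := by unfold Spec_block_transposition_encrypt; infer_instance

-- ===== CLAIM (what is proved, stated in full; the proofs are below) =====
def Claim_equal_block_transposition_encrypt : Prop := ∀ (plaintext : String) (key : Int), Dom_block_transposition_encrypt plaintext key → Spec_block_transposition_encrypt plaintext key (block_transposition_encrypt plaintext key)

-- ===== LEMMAS AND PROOFS =====

theorem pvColA_stop (cs : List Char) (key p : Nat) (h : ¬ (p < cs.length ∧ 0 < key)) :
    pvColA cs key p = [] := by
  rw [pvColA]; simp [h]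

-- appending one character to the text extends exactly the column its index lands in
theorem pvColA_step (cs : List Char) (key p : Nat) (h1 : p < cs.length) (h2 : 0 < key) :
    pvColA cs key p = cs[p] :: pvColA cs key (p + key) := by
  rw [pvColA]; simp [h1, h2]

theorem pvColA_append (n : Nat) (hn : 0 < n) (l : List Char) (x : Char) (p : Nat) :
    pvColA (l ++ [x]) n p
      = pvColA l n p ++ (if p ≤ l.length ∧ (l.length - p) % n = 0 then [x] else []) := by
  have H : ∀ k p, l.length + 1 - p ≤ k →
      pvColA (l ++ [x]) n p
        = pvColA l n p ++ (if p ≤ l.length ∧ (l.length - p) % n = 0 then [x] else []) := by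
    intro k
    induction k with
    | zero =>
      intro p hp
      rw [pvColA_stop (l ++ [x]) n p (by simp; omega), pvColA_stop l n p (by omega)]
      rw [if_neg (by omega)]
      rfl
    | succ k ih =>
      intro p hp
      by_cases h1 : p < l.length
      · rw [pvColA_step (l ++ [x]) n p (by simp; omega) hn, pvColA_step l n p h1 hn]
        rw [ih (p + n) (by omega)]
        have hget : (l ++ [x])[p]'(by simp; omega) = l[p]'h1 := List.getElem_append_left h1
        have hcond : (p + n ≤ l.length ∧ (l.length - (p + n)) % n = 0)
            ↔ (p ≤ l.length ∧ (l.length - p) % n = 0) := by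
          constructor
          · rintro ⟨h2, h3⟩
            refine ⟨by omega, ?_⟩
            have he : l.length - p = (l.length - (p + n)) + n := by omega
            rw [he, Nat.add_mod_right]; exact h3
          · rintro ⟨h2, h3⟩
            have hd := Nat.le_of_dvd (by omega) (Nat.dvd_of_mod_eq_zero h3)
            refine ⟨by omega, ?_⟩
            have he : l.length - p = (l.length - (p + n)) + n := by omega
            rw [he, Nat.add_mod_right] at h3; exact h3
        rw [hget, if_congr hcond rfl rfl]
        simp
      · by_cases h2 : p = l.length
        · subst h2
          rw [pvColA_step (l ++ [x]) n l.length (by simp) hn]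
          rw [pvColA_stop (l ++ [x]) n (l.length + n) (by simp)]
          rw [pvColA_stop l n l.length (by omega)]
          rw [if_pos ⟨le_rfl, by simp⟩]
          simp
        · rw [pvColA_stop (l ++ [x]) n p (by simp; omega), pvColA_stop l n p (by omega)]
          rw [if_neg (by omega)]
          rfl
  exact H (l.length + 1 - p) p le_rfl

-- modify at i < n of a map over range n, pointwise
theorem pv_modify_map_range {α : Type} (n i : Nat) (g : Nat → α) (f : α → α) (hi : i < n) :
    ((List.range n).map g).modify i f
      = (List.range n).map (fun c => if c = i then f (g c) else g c) := by
  apply List.ext_getElem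
  · simp
  · intro j h1 h2
    simp only [List.getElem_modify, List.getElem_map, List.getElem_range]
    simp only [List.length_modify, List.length_map, List.length_range] at h1 h2
    by_cases h : j = i
    · subst h; simp
    · rw [if_neg (fun hh : i = j => h hh.symm), if_neg h]

theorem pv_mod_char (n m c : Nat) (_hn : 0 < n) (hc : c < n) :
    (c ≤ m ∧ (m - c) % n = 0) ↔ c = m % n := by
  constructor
  · rintro ⟨hcm, hmod⟩
    obtain ⟨t, ht⟩ := Nat.dvd_of_mod_eq_zero hmod
    have hm : m = c + n * t := by omega
    rw [hm, Nat.add_mul_mod_self_left, Nat.mod_eq_of_lt hc]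
  · rintro rfl
    refine ⟨Nat.mod_le m n, ?_⟩
    have hdm := Nat.div_add_mod m n
    have : m - m % n = n * (m / n) := by omega
    rw [this, Nat.mul_mod_right]

-- loop invariant for B's single pass: after the first m characters the buckets are A's columns of the prefix
theorem pv_inv (cs : List Char) (key : Int) (n : Nat) (hk : key = (n : Int)) (hn : 0 < n) :
    ∀ m, m ≤ cs.length →
    ((PySem.List.enumerate (cs.take m) 0).foldl
      (fun cols p => cols.modify (PySem.Int.mod p.1 key).toNat (fun col => col ++ [p.2]))
      (List.replicate n ([] : List Char)))
    = (List.range n).map (fun c => pvColA (cs.take m) n c) := by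
  intro m
  induction m with
  | zero =>
    intro _
    simp only [List.take_zero, PySem.List.enumerate_nil, List.foldl_nil]
    have : ∀ c, pvColA ([] : List Char) n c = [] := fun c => pvColA_stop _ _ _ (by simp)
    simp [this]
  | succ m ih =>
    intro hm1
    have hm : m < cs.length := by omega
    have htake : cs.take (m + 1) = cs.take m ++ [cs[m]] := by
      rw [List.take_add_one, List.getElem?_eq_getElem hm]; rfl
    have hlen : (cs.take m).length = m := List.length_take_of_le (by omega)
    rw [htake, PySem.List.enumerate_append, List.foldl_append, ih (by omega)]
    rw [PySem.List.enumerate_cons, PySem.List.enumerate_nil, List.foldl_cons, List.foldl_nil]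
    have hidx : (PySem.Int.mod (0 + ((cs.take m).length : Int)) key).toNat = m % n := by
      rw [hlen, hk, zero_add, PySem.Int.mod_natCast]
      exact Int.toNat_natCast _
    rw [hidx, pv_modify_map_range n (m % n) _ _ (Nat.mod_lt m hn)]
    apply List.map_congr_left
    intro c hc
    rw [pvColA_append n hn (cs.take m) cs[m] c, hlen]
    have hiff := pv_mod_char n m c hn (List.mem_range.mp hc)
    by_cases hcm : c = m % n
    · rw [if_pos hcm, if_pos (hiff.mpr hcm)]
    · rw [if_neg hcm, if_neg (fun h => hcm (hiff.mp h))]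
      simp

-- ===== VERDICT (by name: the statement is the Claim_ definition above) =====
theorem block_transposition_encrypt_spec : Claim_equal_block_transposition_encrypt := by
  intro plaintext key _
  unfold Spec_block_transposition_encrypt
  unfold block_transposition_encrypt block_transposition_encrypt_alt
  by_cases hk : key ≤ 0
  · simp only [hk, if_true]
    have : (key - 0).toNat = 0 := by omega
    rw [PySem.List.pyRange_one, this]
    rfl
  · simp only [hk, if_false]
    have hn : 0 < key.toNat := by omega
    have hkey : key = (key.toNat : Int) := by omega
    have h1 := pv_inv plaintext.toList key key.toNat hkey hn plaintext.toList.length le_rfl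
    rw [List.take_length] at h1
    rw [h1]
    rw [PySem.List.pyRange_one]
    have : (key - 0).toNat = key.toNat := by omega
    rw [this]
    rw [List.map_map]
    congr 2
    apply List.map_congr_left
    intro k _
    simp
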